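-- pv_equiv track=rewrite | github.com/vegadj/nbaPath | nbaPath.py | fillComb
-- ===== SOURCE A (Python) =====
-- def fillComb(maxScore):
-- 	size = maxScore+2
-- 	ABcomb = [[0 for x in range(size)] for x in range(size)]
-- 	"""
-- 	ABcomb is an 2d list.
-- 	Gives value for scoreA and scoreB combination lenght
-- 	"""
-- 	"""
-- 		initial Values for AB matrix is 1
-- 		for all values in column 1 and row 1
-- 	"""
-- 	for i in range(1,size):
-- 		ABcomb[i][1] = 1
-- 		ABcomb[1][i] = 1
-- 	"""
-- 		all other (i,j) values depends on sum of two neighbour diagonal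
-- 		value:
-- 			(i,j) = (i-1,j)+ (i, j-1)
-- 	"""
-- 	for i in range(2,size):
-- 		for j in range(2,size):
-- 			ABcomb[i][j]=ABcomb[i-1][j] + ABcomb[i][j-1]
-- 	return ABcomb
-- ===== SOURCE B (Python) =====
-- def fillComb(maxScore):
--     size = maxScore + 2
--     out = []
--     for i in range(size):
--         row = [0] * size
--         if i > 0:
--             # row i is the binomial sequence C(i+j-2, i-1), produced by an
--             # exact multiplicative scan; no other row is ever consulted
--             v = 1
--             for j in range(1, size):
--                 row[j] = v
--                 v = v * (i + j - 1) // j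
--         out.append(row)
--     return out
-- ===== Notes on version B (the rewrite author's own statement) =====
-- stated objective: alternative
-- what changed: B abandons the 2D DP table recurrence (each cell = sum of two neighbours over a shared mutable table) and instead builds every row independently by a closed-form multiplicative binomial scan (v = v*(i+j-1)//j), so no row ever reads another row.
import Mathlib
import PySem

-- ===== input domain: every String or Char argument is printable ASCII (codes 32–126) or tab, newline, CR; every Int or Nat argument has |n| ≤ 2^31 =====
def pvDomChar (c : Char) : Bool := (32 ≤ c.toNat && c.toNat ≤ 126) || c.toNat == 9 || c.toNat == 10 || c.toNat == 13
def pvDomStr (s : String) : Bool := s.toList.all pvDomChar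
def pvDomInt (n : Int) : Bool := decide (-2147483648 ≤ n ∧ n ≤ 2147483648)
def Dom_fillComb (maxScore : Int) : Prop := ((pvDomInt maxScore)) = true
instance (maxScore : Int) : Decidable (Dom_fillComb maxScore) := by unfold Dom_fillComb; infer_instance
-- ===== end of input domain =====

-- B replaces the two-neighbour DP recurrence by an independent per-row multiplicative
-- scan (each row is the closed-form binomial sequence); objective: alternative algorithm.

-- ===== PORT A =====
def fillComb (maxScore : Int) : List (List Int) :=
  let size := maxScore + 2
  let ABcomb : List (List Int) :=
    (PySem.List.pyRange 0 size 1).map (fun _ =>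
      (PySem.List.pyRange 0 size 1).map (fun _ => (0 : Int)))
  let ABcomb := (PySem.List.pyRange 1 size 1).foldl (fun t i =>
      let t := PySem.List.pySetD t i
        (PySem.List.pySetD (PySem.List.pyGetD t i []) 1 1)
      PySem.List.pySetD t 1
        (PySem.List.pySetD (PySem.List.pyGetD t 1 []) i 1)) ABcomb
  (PySem.List.pyRange 2 size 1).foldl (fun t i =>
    (PySem.List.pyRange 2 size 1).foldl (fun t j =>
      PySem.List.pySetD t i
        (PySem.List.pySetD (PySem.List.pyGetD t i []) j
          (PySem.List.pyGetD (PySem.List.pyGetD t (i - 1) []) j 0 +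
           PySem.List.pyGetD (PySem.List.pyGetD t i []) (j - 1) 0))) t) ABcomb

-- ===== PORT B =====
def fillComb_alt (maxScore : Int) : List (List Int) :=
  let size := maxScore + 2
  (PySem.List.pyRange 0 size 1).foldl (fun out i =>
    let row := PySem.List.pyRepeat [(0 : Int)] size
    let rowv : List Int × Int :=
      if i > 0 then
        (PySem.List.pyRange 1 size 1).foldl (fun rv j =>
          (PySem.List.pySetD rv.1 j rv.2,
           PySem.Int.floordiv (rv.2 * (i + j - 1)) j)) (row, 1)
      else (row, 1)
    out ++ [rowv.1]) []

-- ===== PRECONDITION & SPEC =====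
def Spec_fillComb (maxScore : Int) (out : List (List Int)) : Prop := out = fillComb_alt maxScore
instance (maxScore : Int) (out : List (List Int)) : Decidable (Spec_fillComb maxScore out) := by unfold Spec_fillComb; infer_instance

-- ===== CLAIM (what is proved, stated in full; the proofs are below) =====
def Claim_equal_fillComb : Prop := ∀ (maxScore : Int), Dom_fillComb maxScore → Spec_fillComb maxScore (fillComb maxScore)

-- ===== LEMMAS AND PROOFS =====

/-- the intended cell value: 0 on the zero border, else the binomial C(i+j-2, i-1) -/
def pvCell (i j : Nat) : Int := if i = 0 ∨ j = 0 then 0 else ((i + j - 2).choose (i - 1) : Int)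

/-- the table both programs compute, as a pure double map -/
def pvTab (n : Nat) (g : Nat → Nat → Int) : List (List Int) :=
  (List.range n).map (fun i => (List.range n).map (g i))

/-- border values after A's first loop has run up to bound k -/
def pvBorder (k : Nat) (i j : Nat) : Int :=
  if (j = 1 ∧ 1 ≤ i ∧ i < k) ∨ (i = 1 ∧ 1 ≤ j ∧ j < k) then 1 else 0

/-- state of A's table while the main DP loop is at outer row i -/
def pvMid (n i : Nat) (r c : Nat) : Int :=
  if r < i then pvCell r c else pvBorder n r c

/-- state of A's table while the inner DP loop on row i is at column j -/
def pvInner (n i j : Nat) (r c : Nat) : Int :=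
  if r < i then pvCell r c
  else if r = i then (if c < j then pvCell r c else pvBorder n r c)
  else pvBorder n r c

lemma pvTab_congr {n : Nat} {g g' : Nat → Nat → Int}
    (h : ∀ r c, r < n → c < n → g r c = g' r c) : pvTab n g = pvTab n g' := by
  unfold pvTab
  refine List.map_congr_left (fun r hr => ?_)
  exact List.map_congr_left (fun c hc => h r c (List.mem_range.mp hr) (List.mem_range.mp hc))

lemma set_map_range {α : Type} (n i : Nat) (f : Nat → α) (v : α) :
    ((List.range n).map f).set i v = (List.range n).map (fun k => if k = i then v else f k) := by
  apply List.ext_getElem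
  · simp
  · intro k h1 h2
    simp only [List.getElem_set, List.getElem_map, List.getElem_range]
    simp at h1
    split_ifs with h h' h'
    · rfl
    · omega
    · omega
    · rfl

lemma pvCell_row0 (c : Nat) : pvCell 0 c = 0 := by simp [pvCell]

lemma pvCell_col0 (r : Nat) : pvCell r 0 = 0 := by simp [pvCell]

lemma pvCell_row1 (c : Nat) (hc : 1 ≤ c) : pvCell 1 c = 1 := by
  unfold pvCell
  rw [if_neg (by omega), show 1 + c - 2 = c - 1 from by omega, Nat.choose_zero_right]
  rfl

lemma pvCell_col1 (r : Nat) (hr : 1 ≤ r) : pvCell r 1 = 1 := by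
  unfold pvCell
  rw [if_neg (by omega), show r + 1 - 2 = r - 1 from by omega, Nat.choose_self]
  rfl

lemma pvTab_getD (n : Nat) (g : Nat → Nat → Int) (a : Nat) (ha : a < n) :
    (pvTab n g).getD a [] = (List.range n).map (g a) :=
  PySem.List.getD_map_range _ n a [] ha

lemma pvTab_set (n a : Nat) (g : Nat → Nat → Int) (hfun : Nat → Int) :
    (pvTab n g).set a ((List.range n).map hfun)
      = pvTab n (fun r c => if r = a then hfun c else g r c) := by
  unfold pvTab
  rw [set_map_range]
  exact List.map_congr_left (fun r _ => by by_cases hr : r = a <;> simp [hr])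

lemma pyRange_cast (a b : Nat) :
    PySem.List.pyRange (a : Int) (b : Int) 1 = (List.range' a (b - a)).map (fun k : Nat => (k : Int)) := by
  rw [PySem.List.pyRange_one, List.range'_eq_map_range, List.map_map]
  have : ((b : Int) - (a : Int)).toNat = b - a := by omega
  rw [this]
  exact List.map_congr_left (fun x _ => by simp [Function.comp])

lemma pascal_cell {i j : Nat} (hi : 2 ≤ i) (hj : 2 ≤ j) :
    pvCell i j = pvCell (i - 1) j + pvCell i (j - 1) := by
  have key : (i + j - 2).choose (i - 1)
      = ((i - 1) + j - 2).choose ((i - 1) - 1) + (i + (j - 1) - 2).choose (i - 1) := by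
    have h := Nat.choose_succ_succ (i + j - 3) (i - 2)
    have e1 : i + j - 3 + 1 = i + j - 2 := by omega
    have e2 : i - 2 + 1 = i - 1 := by omega
    have e3 : i + j - 3 = (i - 1) + j - 2 := by omega
    have e4 : i - 2 = (i - 1) - 1 := by omega
    have e5 : (i - 1) + j - 2 = i + (j - 1) - 2 := by omega
    simp only [Nat.succ_eq_add_one] at h
    rw [e1, e2] at h
    rw [h, e3, e4]
    congr 1
    rw [← e5, ← e3]
  unfold pvCell
  rw [if_neg (by omega), if_neg (by omega), if_neg (by omega)]
  exact_mod_cast key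

lemma choose_step (i a : Nat) (hi : 1 ≤ i) (ha : 1 ≤ a) :
    (i + a - 2).choose (i - 1) * (i + a - 1) = (i + a - 1).choose (i - 1) * a := by
  have h1 := Nat.choose_mul_succ_eq (i + a - 2) (i - 1)
  have e1 : (i + a - 2) + 1 = i + a - 1 := by omega
  have e2 : i + a - 1 - (i - 1) = a := by omega
  rw [e1, e2] at h1
  exact h1

-- ===== A-side proofs =====

lemma A_border_step (n a : Nat) (ha : 1 ≤ a) (han : a < n) :
    PySem.List.pySetD
      (PySem.List.pySetD (pvTab n (pvBorder a)) (a : Int)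
        (PySem.List.pySetD (PySem.List.pyGetD (pvTab n (pvBorder a)) (a : Int) []) 1 1)) 1
      (PySem.List.pySetD
        (PySem.List.pyGetD
          (PySem.List.pySetD (pvTab n (pvBorder a)) (a : Int)
            (PySem.List.pySetD (PySem.List.pyGetD (pvTab n (pvBorder a)) (a : Int) []) 1 1)) 1 [])
        (a : Int) 1)
    = pvTab n (pvBorder (a + 1)) := by
  rw [show (1 : Int) = ((1 : Nat) : Int) from rfl]
  simp only [PySem.List.pySetD_natCast, PySem.List.pyGetD_natCast]
  rw [pvTab_getD n _ a han, set_map_range, pvTab_set,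
    pvTab_getD n _ 1 (by omega), set_map_range, pvTab_set]
  exact pvTab_congr (fun r c hr hc => by unfold pvBorder; split_ifs <;> omega)

lemma A_border_loop (n : Nat) : ∀ (m a : Nat), 1 ≤ a → a + m ≤ n →
    (List.range' a m).foldl (fun (t : List (List Int)) (k : Nat) =>
      PySem.List.pySetD
        (PySem.List.pySetD t (k : Int)
          (PySem.List.pySetD (PySem.List.pyGetD t (k : Int) []) 1 1)) 1
        (PySem.List.pySetD
          (PySem.List.pyGetD
            (PySem.List.pySetD t (k : Int)
              (PySem.List.pySetD (PySem.List.pyGetD t (k : Int) []) 1 1)) 1 [])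
          (k : Int) 1))
      (pvTab n (pvBorder a)) = pvTab n (pvBorder (a + m)) := by
  intro m
  induction m with
  | zero => intro a _ _; simp
  | succ m ih =>
    intro a ha han
    rw [List.range'_succ]
    simp only [List.foldl_cons]
    rw [A_border_step n a ha (by omega), ih (a + 1) (by omega) (by omega),
      show a + 1 + m = a + (m + 1) from by omega]

lemma A_inner_step (n i a : Nat) (hi2 : 2 ≤ i) (hin : i < n) (ha2 : 2 ≤ a) (han : a < n) :
    PySem.List.pySetD (pvTab n (pvInner n i a)) (i : Int)
      (PySem.List.pySetD (PySem.List.pyGetD (pvTab n (pvInner n i a)) (i : Int) []) (a : Int)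
        (PySem.List.pyGetD (PySem.List.pyGetD (pvTab n (pvInner n i a)) ((i : Int) - 1) []) (a : Int) 0 +
         PySem.List.pyGetD (PySem.List.pyGetD (pvTab n (pvInner n i a)) (i : Int) []) ((a : Int) - 1) 0))
    = pvTab n (pvInner n i (a + 1)) := by
  rw [show ((i : Int) - 1) = ((i - 1 : Nat) : Int) from by omega,
    show ((a : Int) - 1) = ((a - 1 : Nat) : Int) from by omega]
  simp only [PySem.List.pySetD_natCast, PySem.List.pyGetD_natCast]
  rw [pvTab_getD n _ i hin, pvTab_getD n _ (i - 1) (by omega),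
    PySem.List.getD_map_range (pvInner n i a (i - 1)) n a 0 han,
    PySem.List.getD_map_range (pvInner n i a i) n (a - 1) 0 (by omega),
    show pvInner n i a (i - 1) a = pvCell (i - 1) a from by
      unfold pvInner; rw [if_pos (by omega)],
    show pvInner n i a i (a - 1) = pvCell i (a - 1) from by
      unfold pvInner; rw [if_neg (by omega), if_pos rfl, if_pos (by omega)],
    ← pascal_cell hi2 ha2, set_map_range, pvTab_set]
  refine pvTab_congr (fun r c hr hc => ?_)
  unfold pvInner
  split_ifs <;> first | rfl | omega | (subst_vars; rfl)

lemma A_inner_loop (n i : Nat) (hi2 : 2 ≤ i) (hin : i < n) : ∀ (m a : Nat), 2 ≤ a → a + m ≤ n →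
    (List.range' a m).foldl (fun (t : List (List Int)) (k : Nat) =>
      PySem.List.pySetD t (i : Int)
        (PySem.List.pySetD (PySem.List.pyGetD t (i : Int) []) (k : Int)
          (PySem.List.pyGetD (PySem.List.pyGetD t ((i : Int) - 1) []) (k : Int) 0 +
           PySem.List.pyGetD (PySem.List.pyGetD t (i : Int) []) ((k : Int) - 1) 0)))
      (pvTab n (pvInner n i a)) = pvTab n (pvInner n i (a + m)) := by
  intro m
  induction m with
  | zero => intro a _ _; simp
  | succ m ih =>
    intro a ha han
    rw [List.range'_succ]
    simp only [List.foldl_cons]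
    rw [A_inner_step n i a hi2 hin ha (by omega), ih (a + 1) (by omega) (by omega),
      show a + 1 + m = a + (m + 1) from by omega]

lemma pvCell_one (r c : Nat) (h : (c = 1 ∧ 1 ≤ r) ∨ (r = 1 ∧ 1 ≤ c)) : pvCell r c = 1 := by
  rcases h with ⟨hc, hr⟩ | ⟨hr, hc⟩
  · subst hc; exact pvCell_col1 r hr
  · subst hr; exact pvCell_row1 c hc

lemma pvCell_zero (r c : Nat) (h : r = 0 ∨ c = 0) : pvCell r c = 0 := by
  rcases h with h | h <;> subst h
  · exact pvCell_row0 c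
  · exact pvCell_col0 r

lemma mid_to_inner (n a : Nat) (ha2 : 2 ≤ a) (han : a < n) :
    pvTab n (pvMid n a) = pvTab n (pvInner n a 2) := by
  refine pvTab_congr (fun r c hr hc => ?_)
  unfold pvMid pvInner pvBorder
  split_ifs <;> first
    | rfl | omega
    | (exact (pvCell_one r c (by omega)).symm)
    | (exact (pvCell_zero r c (by omega)).symm)

lemma inner_to_mid (n a : Nat) (_ : 2 ≤ a) (_ : a < n) :
    pvTab n (pvInner n a n) = pvTab n (pvMid n (a + 1)) := by
  refine pvTab_congr (fun r c hr hc => ?_)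
  unfold pvMid pvInner
  split_ifs <;> first | rfl | omega

lemma A_outer_loop (n : Nat) : ∀ (m a : Nat), 2 ≤ a → a + m ≤ n →
    (List.range' a m).foldl (fun (t : List (List Int)) (k : Nat) =>
      (List.range' 2 (n - 2)).foldl (fun (t : List (List Int)) (j : Nat) =>
        PySem.List.pySetD t (k : Int)
          (PySem.List.pySetD (PySem.List.pyGetD t (k : Int) []) (j : Int)
            (PySem.List.pyGetD (PySem.List.pyGetD t ((k : Int) - 1) []) (j : Int) 0 +
             PySem.List.pyGetD (PySem.List.pyGetD t (k : Int) []) ((j : Int) - 1) 0))) t)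
      (pvTab n (pvMid n a)) = pvTab n (pvMid n (a + m)) := by
  intro m
  induction m with
  | zero => intro a _ _; simp
  | succ m ih =>
    intro a ha han
    rw [List.range'_succ]
    simp only [List.foldl_cons]
    rw [mid_to_inner n a ha (by omega),
      A_inner_loop n a ha (by omega) (n - 2) 2 (by omega) (by omega),
      show 2 + (n - 2) = n from by omega,
      inner_to_mid n a ha (by omega),
      ih (a + 1) (by omega) (by omega),
      show a + 1 + m = a + (m + 1) from by omega]

lemma border_to_mid (n : Nat) (_ : 2 ≤ n) :
    pvTab n (pvBorder n) = pvTab n (pvMid n 2) := by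
  refine pvTab_congr (fun r c hr hc => ?_)
  unfold pvMid pvBorder
  split_ifs <;> first
    | rfl | omega
    | (exact (pvCell_one r c (by omega)).symm)
    | (exact (pvCell_zero r c (by omega)).symm)

lemma mid_to_cell (n : Nat) : pvTab n (pvMid n n) = pvTab n pvCell :=
  pvTab_congr (fun r c hr _ => by unfold pvMid; rw [if_pos hr])

lemma A_eq_tab (maxScore : Int) (h : 0 < maxScore + 2) :
    fillComb maxScore = pvTab (maxScore + 2).toNat pvCell := by
  obtain ⟨n, hn⟩ : ∃ n : Nat, (n : Int) = maxScore + 2 :=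
    ⟨(maxScore + 2).toNat, Int.toNat_of_nonneg (by omega)⟩
  have hn1 : 1 ≤ n := by omega
  rw [fillComb, ← hn, Int.toNat_natCast]
  have h0 : PySem.List.pyRange 0 (n : Int) 1 = (List.range n).map (fun k : Nat => (k : Int)) := by
    have := pyRange_cast 0 n
    simpa [List.range_eq_range'] using this
  have h1 : PySem.List.pyRange 1 (n : Int) 1 = (List.range' 1 (n - 1)).map (fun k : Nat => (k : Int)) := by
    have := pyRange_cast 1 n
    simpa using this
  have h2 : PySem.List.pyRange 2 (n : Int) 1 = (List.range' 2 (n - 2)).map (fun k : Nat => (k : Int)) := by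
    have := pyRange_cast 2 n
    simpa using this
  simp only [h0, h1, h2, List.foldl_map, List.map_map]
  have hinit : List.map ((fun (_ : Int) =>
        List.map ((fun (_ : Int) => (0 : Int)) ∘ (fun k : Nat => (k : Int))) (List.range n)) ∘
        (fun k : Nat => (k : Int))) (List.range n) = pvTab n (pvBorder 1) := by
    unfold pvTab
    refine List.map_congr_left (fun r _ => ?_)
    simp only [Function.comp]
    exact List.map_congr_left (fun c _ => by simp [pvBorder]; omega)
  rw [hinit, A_border_loop n (n - 1) 1 (by omega) (by omega),
    show 1 + (n - 1) = n from by omega]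
  by_cases hn2 : 2 ≤ n
  · rw [border_to_mid n hn2, A_outer_loop n (n - 2) 2 (by omega) (by omega),
      show 2 + (n - 2) = n from by omega, mid_to_cell n]
  · have hne : n = 1 := by omega
    subst hne
    simp only [show (1 : Nat) - 2 = 0 from rfl, List.range'_zero, List.foldl_nil]
    exact pvTab_congr (fun r c hr hc => by
      unfold pvBorder pvCell
      split_ifs <;> first | rfl | omega)

-- ===== B-side proofs =====

lemma B_row_loop (n i : Nat) (hi : 1 ≤ i) : ∀ (m a : Nat), 1 ≤ a → a + m ≤ n →
    (List.range' a m).foldl (fun (rv : List Int × Int) (k : Nat) =>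
      (PySem.List.pySetD rv.1 (k : Int) rv.2,
       PySem.Int.floordiv (rv.2 * ((i : Int) + (k : Int) - 1)) (k : Int)))
      ((List.range n).map (fun c => if 1 ≤ c ∧ c < a then pvCell i c else 0),
       ((i + a - 2).choose (i - 1) : Int))
    = ((List.range n).map (fun c => if 1 ≤ c ∧ c < a + m then pvCell i c else 0),
       ((i + (a + m) - 2).choose (i - 1) : Int)) := by
  intro m
  induction m with
  | zero => intro a _ _; simp
  | succ m ih =>
    intro a ha han
    rw [List.range'_succ, List.foldl_cons]
    have hcell : ((i + a - 2).choose (i - 1) : Int) = pvCell i a := by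
      unfold pvCell; rw [if_neg (by omega)]
    have hrow : PySem.List.pySetD
        ((List.range n).map (fun c => if 1 ≤ c ∧ c < a then pvCell i c else 0)) (a : Int)
        ((i + a - 2).choose (i - 1) : Int)
        = (List.range n).map (fun c => if 1 ≤ c ∧ c < a + 1 then pvCell i c else 0) := by
      rw [PySem.List.pySetD_natCast, set_map_range]
      refine List.map_congr_left (fun k _ => ?_)
      by_cases h : k = a
      · subst h; rw [if_pos rfl, if_pos (by omega)]; exact hcell
      · rw [if_neg h]; split_ifs <;> first | rfl | omega
    have hv : PySem.Int.floordiv (((i + a - 2).choose (i - 1) : Int) * ((i : Int) + (a : Int) - 1)) (a : Int)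
        = ((i + (a + 1) - 2).choose (i - 1) : Int) := by
      have e : ((i : Int) + (a : Int) - 1) = (((i + a - 1 : Nat)) : Int) := by omega
      rw [e,
        show ((i + a - 2).choose (i - 1) : Int) * (((i + a - 1 : Nat)) : Int)
            = (((i + a - 2).choose (i - 1) * (i + a - 1) : Nat) : Int) from (Nat.cast_mul _ _).symm,
        choose_step i a hi ha, PySem.Int.floordiv_natCast,
        Nat.mul_div_cancel _ (by omega : 0 < a),
        show i + a - 1 = i + (a + 1) - 2 from by omega]
    simp only []
    rw [hrow, hv,
      show a + (m + 1) = (a + 1) + m from by omega]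
    exact ih (a + 1) (by omega) (by omega)

lemma hrepcell0 (n : Nat) : List.replicate n (0 : Int) = (List.range n).map (fun _ => (0 : Int)) := by
  rw [List.map_const', List.length_range]

lemma hrepcell (n : Nat) : List.replicate n (0 : Int) = (List.range n).map (pvCell 0) := by
  rw [hrepcell0]
  exact List.map_congr_left (fun c _ => by simp [pvCell])

lemma B_eq_tab (maxScore : Int) (h : 0 < maxScore + 2) :
    fillComb_alt maxScore = pvTab (maxScore + 2).toNat pvCell := by
  obtain ⟨n, hn⟩ : ∃ n : Nat, (n : Int) = maxScore + 2 :=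
    ⟨(maxScore + 2).toNat, Int.toNat_of_nonneg (by omega)⟩
  rw [fillComb_alt, ← hn, Int.toNat_natCast]
  have h0 : PySem.List.pyRange 0 (n : Int) 1 = (List.range n).map (fun k : Nat => (k : Int)) := by
    have := pyRange_cast 0 n
    simpa [List.range_eq_range'] using this
  have h1 : PySem.List.pyRange 1 (n : Int) 1 = (List.range' 1 (n - 1)).map (fun k : Nat => (k : Int)) := by
    have := pyRange_cast 1 n
    simpa using this
  have hrep : PySem.List.pyRepeat [(0 : Int)] (n : Int) = List.replicate n (0 : Int) := by
    rw [PySem.List.pyRepeat_singleton, Int.toNat_natCast]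
  simp only [h0, h1, hrep, List.foldl_map]
  rw [PySem.List.foldl_append_singleton_eq_map, List.nil_append]
  unfold pvTab
  refine List.map_congr_left (fun k hk => ?_)
  have hkn : k < n := List.mem_range.mp hk
  by_cases hk0 : k = 0
  · subst hk0
    simp only [show ¬((0 : Nat) : Int) > 0 from by omega, if_false]
    rw [hrepcell n]
  · have hk1 : 1 ≤ k := by omega
    simp only [show ((k : Nat) : Int) > 0 from by omega, if_true]
    have hinit : ((List.replicate n (0 : Int)), (1 : Int))
        = ((List.range n).map (fun c => if 1 ≤ c ∧ c < 1 then pvCell k c else 0),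
           ((k + 1 - 2).choose (k - 1) : Int)) := by
      congr 1
      · rw [hrepcell0 n]
        exact List.map_congr_left (fun c _ => by rw [if_neg (by omega)])
      · rw [show k + 1 - 2 = k - 1 from by omega, Nat.choose_self]; rfl
    rw [hinit, B_row_loop n k hk1 (n - 1) 1 (by omega) (by omega)]
    refine List.map_congr_left (fun c hc => ?_)
    have hcn : c < n := List.mem_range.mp hc
    by_cases hc0 : c = 0
    · subst hc0; simp [pvCell]
    · rw [if_pos (by omega)]

-- ===== VERDICT (by name: the statement is the Claim_ definition above) =====
theorem fillComb_spec : Claim_equal_fillComb := by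
  intro maxScore _
  unfold Spec_fillComb
  by_cases h : 0 < maxScore + 2
  · rw [A_eq_tab maxScore h, B_eq_tab maxScore h]
  · have he : PySem.List.pyRange 0 (maxScore + 2) 1 = [] :=
      PySem.List.pyRange_one_eq_nil (by omega)
    have he1 : PySem.List.pyRange 1 (maxScore + 2) 1 = [] :=
      PySem.List.pyRange_one_eq_nil (by omega)
    have he2 : PySem.List.pyRange 2 (maxScore + 2) 1 = [] :=
      PySem.List.pyRange_one_eq_nil (by omega)
    simp [fillComb, fillComb_alt, he, he1, he2]
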